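-- pv_equiv track=rewrite | github.com/MrBrantCode/unitest_baseline | mut_generate/mist_train_cf/cf_18064/solution.py | count_unique_primes
-- ===== SOURCE A (Python) =====
-- def count_unique_primes(arr):
--     def is_prime(num):
--         if num < 2:
--             return False
--         for i in range(2, int(num ** 0.5) + 1):
--             if num % i == 0:
--                 return False
--         return True
--
--     prime_counts = {}
--     for num in arr:
--         if is_prime(num):
--             if num in prime_counts:
--                 prime_counts[num] += 1
--             else:
--                 prime_counts[num] = 1
--
--     return prime_counts
-- ===== SOURCE B (Python) =====
-- def count_unique_primes(arr):
--     # distinct candidate values (>= 2) and their maximum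
--     vals = set()
--     big = 1
--     for v in arr:
--         if v >= 2:
--             vals.add(v)
--             if v > big:
--                 big = v
--     # integer square root of big
--     r = 1
--     while (r + 1) * (r + 1) <= big:
--         r += 1
--     # primes up to r = isqrt(big): test each candidate only against smaller primes
--     primes = []
--     for p in range(2, r + 1):
--         is_p = True
--         for q in primes:
--             if q * q > p:
--                 break
--             if p % q == 0:
--                 is_p = False
--                 break
--         if is_p:
--             primes.append(p)
--     # sweep the candidate set once per prime <= isqrt(big): any candidate divisible
--     # by a prime other than itself is composite, and every composite candidate has
--     # a prime factor <= isqrt(big), so this finds exactly the composites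
--     composite = set()
--     vlist = list(vals)
--     for p in primes:
--         composite.update(v for v in vlist if v % p == 0 and v != p)
--     # count the surviving (prime) values in input order
--     counts = {}
--     for v in arr:
--         if v in vals and v not in composite:
--             counts[v] = counts.get(v, 0) + 1
--     return counts
-- ===== Notes on version B (the rewrite author's own statement) =====
-- stated objective: alternative
-- what changed: B runs no per-element trial division: it collects the distinct values and their maximum in one pass, builds the prime list up to isqrt(max) once (each candidate tested only against smaller primes), marks the composite members of the distinct-value set by sweeping it once per such prime (every composite candidate has a prime factor <= isqrt(max)), and counts with plain set-membership tests.
import Mathlib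
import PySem

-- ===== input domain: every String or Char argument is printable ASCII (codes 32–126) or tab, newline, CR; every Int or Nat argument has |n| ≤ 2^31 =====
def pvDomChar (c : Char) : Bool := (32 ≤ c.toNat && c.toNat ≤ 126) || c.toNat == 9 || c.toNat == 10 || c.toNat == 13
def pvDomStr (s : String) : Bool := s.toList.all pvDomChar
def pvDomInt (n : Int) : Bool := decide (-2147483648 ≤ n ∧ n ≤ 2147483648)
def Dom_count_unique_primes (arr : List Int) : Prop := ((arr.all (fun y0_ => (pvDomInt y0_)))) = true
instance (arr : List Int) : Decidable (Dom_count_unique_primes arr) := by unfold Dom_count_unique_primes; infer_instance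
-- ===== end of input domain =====

-- B replaces A's per-element trial division: it builds the primes up to isqrt(max) once,
-- marks the composite members of the distinct-value set by sweeping it once per such prime,
-- then counts with plain set-membership tests. Return-value equivalence.


-- ===== PORT A =====
-- A's inner is_prime.  int(num ** 0.5) is ported as Nat.sqrt num.toNat: for 0 ≤ num ≤ 2^31 the
-- double sqrt is correctly rounded, so int(num**0.5) = floor sqrt (checked against CPython on the
-- whole near-square range up to 2^31); for num < 2 the branch below returns before the sqrt.
def isPrimeA (num : Int) : Bool :=
  if num < 2 then false
  else !((PySem.List.pyRange 2 (((Nat.sqrt num.toNat) : Int) + 1) 1).any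
          (fun i => PySem.Int.mod num i == 0))

def count_unique_primes (arr : List Int) : List (Int × Int) :=
  (arr.foldl (fun d num =>
      if isPrimeA num then
        if d.contains num then d.modify num 0 (· + 1) else d.insert num 1
      else d)
    (PySem.Dict.empty : PySem.Dict Int Int)).items

-- ===== PORT B =====
-- B's 'r = 1; while (r+1)*(r+1) <= big: r += 1' (integer square root of big)
def isqrtLoop (big r : Int) : Int :=
  if (r + 1) * (r + 1) ≤ big then isqrtLoop big (r + 1) else r
termination_by (big - r).toNat
decreasing_by
  have h : r < big := by nlinarith [sq_nonneg (2 * r + 1)]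
  omega

-- B's inner 'for q in primes: if q*q > p: break; if p % q == 0: is_p = False; break'
def checkPrimes (ps : List Int) (p : Int) : Bool :=
  match ps with
  | [] => true
  | q :: t =>
    if q * q > p then true
    else if PySem.Int.mod p q == 0 then false
    else checkPrimes t p

def count_unique_primes_alt (arr : List Int) : List (Int × Int) :=
  -- one pass: vals = distinct values >= 2, big = running max (init 1)
  let vb := arr.foldl (fun (s : PySem.Set Int × Int) v =>
      (if 2 ≤ v then PySem.Set.add s.1 v else s.1,
       if 2 ≤ v then (if s.2 < v then v else s.2) else s.2))
    ((PySem.Set.empty : PySem.Set Int), (1 : Int))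
  let vals := vb.1
  let big := vb.2
  let r := isqrtLoop big 1
  -- 'for p in range(2, r+1): <test p against primes found so far>; if is_p: primes.append(p)'
  let primes := (PySem.List.pyRange 2 (r + 1) 1).foldl
      (fun ps p => if checkPrimes ps p then ps ++ [p] else ps) ([] : List Int)
  -- 'for p in primes: composite.update(v for v in vlist if v % p == 0 and v != p)'
  -- (composite is consumed only through membership, so vlist's set-iteration order is immaterial)
  let composite := primes.foldl
      (fun (c : PySem.Set Int) p =>
        PySem.Set.update c (vals.filter (fun v => PySem.Int.mod v p == 0 && v != p)))
    (PySem.Set.empty : PySem.Set Int)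
  -- counting pass in input order
  (arr.foldl (fun (d : PySem.Dict Int Int) v =>
      if PySem.Set.contains vals v && !(PySem.Set.contains composite v)
      then d.insert v (d.getD v 0 + 1) else d)
    (PySem.Dict.empty : PySem.Dict Int Int)).items

-- ===== PRECONDITION & SPEC =====
def Spec_count_unique_primes (arr : List Int) (out : List (Int × Int)) : Prop := out = count_unique_primes_alt arr
instance (arr : List Int) (out : List (Int × Int)) : Decidable (Spec_count_unique_primes arr out) := by unfold Spec_count_unique_primes; infer_instance

-- ===== CLAIM (what is proved, stated in full; the proofs are below) =====
def Claim_equal_count_unique_primes : Prop := ∀ (arr : List Int), Dom_count_unique_primes arr → Spec_count_unique_primes arr (count_unique_primes arr)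

-- ===== LEMMAS AND PROOFS =====

-- A's trial division decides primality of num.toNat (for num ≥ 2)
lemma isPrimeA_iff (num : Int) : isPrimeA num = true ↔ 2 ≤ num ∧ Nat.Prime num.toNat := by
  by_cases h : num < 2
  · simp only [isPrimeA, h, if_true]
    constructor
    · intro hc; simp at hc
    · intro hc; omega
  · replace h : 2 ≤ num := by omega
    simp only [isPrimeA, if_neg (by omega : ¬ num < 2), Bool.not_eq_eq_eq_not, Bool.not_true,
      List.any_eq_false]
    have hnum : num = ((num.toNat : Int)) := by omega
    constructor
    · intro hall
      refine ⟨h, Nat.prime_def_le_sqrt.mpr ⟨by omega, ?_⟩⟩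
      intro m hm hms hdvd
      have hmem : (m : Int) ∈ PySem.List.pyRange 2 (((Nat.sqrt num.toNat) : Int) + 1) 1 := by
        rw [PySem.List.mem_pyRange_one]
        constructor <;> [exact_mod_cast hm;
          exact_mod_cast (by omega : (m:Int) < (Nat.sqrt num.toNat : Int) + 1)]
      apply hall _ hmem
      rw [beq_iff_eq, PySem.Int.mod_eq_zero_iff_dvd]
      rw [hnum]; exact_mod_cast hdvd
    · rintro ⟨-, hpr⟩
      intro i hi
      rw [PySem.List.mem_pyRange_one] at hi
      intro hmod
      rw [beq_iff_eq, PySem.Int.mod_eq_zero_iff_dvd] at hmod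
      have h2i : 2 ≤ i := hi.1
      have : i = ((i.toNat : Int)) := by omega
      rw [this, hnum] at hmod
      have hdvd : i.toNat ∣ num.toNat := by exact_mod_cast hmod
      have hle : i.toNat ≤ Nat.sqrt num.toNat := by omega
      exact (Nat.prime_def_le_sqrt.mp hpr).2 i.toNat (by omega) hle hdvd

-- the running max of B's first pass bounds every value ≥ 2 of the list
lemma big_bounds (l : List Int) (b : Int) :
    b ≤ l.foldl (fun b v => if 2 ≤ v then (if b < v then v else b) else b) b ∧
    ∀ v ∈ l, 2 ≤ v → v ≤ l.foldl (fun b v => if 2 ≤ v then (if b < v then v else b) else b) b := by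
  induction l generalizing b with
  | nil => simp
  | cons x t ih =>
    simp only [List.foldl_cons, List.mem_cons]
    constructor
    · refine le_trans ?_ (ih _).1
      split_ifs <;> omega
    · rintro v (rfl | hv) h2
      · refine le_trans ?_ (ih _).1
        split_ifs <;> omega
      · exact (ih _).2 v hv h2

-- B's while loop never decreases r and stops only past the integer square root
lemma isqrtLoop_le (big r : Int) : r ≤ isqrtLoop big r := by
  induction r using isqrtLoop.induct (big := big) with
  | case1 r h ih => rw [isqrtLoop, if_pos h]; omega
  | case2 r h => rw [isqrtLoop, if_neg h]

lemma isqrtLoop_stop (big r : Int) :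
    ¬ ((isqrtLoop big r + 1) * (isqrtLoop big r + 1) ≤ big) := by
  induction r using isqrtLoop.induct (big := big) with
  | case1 r h ih => rwa [isqrtLoop, if_pos h]
  | case2 r h => rwa [isqrtLoop, if_neg h]

lemma le_isqrtLoop (big q : Int) (h1 : 1 ≤ q) (h2 : q * q ≤ big) : q ≤ isqrtLoop big 1 := by
  by_contra hlt
  push Not at hlt
  have hR : 1 ≤ isqrtLoop big 1 := isqrtLoop_le big 1
  have : (isqrtLoop big 1 + 1) * (isqrtLoop big 1 + 1) ≤ q * q := by nlinarith
  exact isqrtLoop_stop big 1 (le_trans this h2)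

-- B's break loop over the prime list: true iff no listed prime q with q*q <= p divides p
-- (the early break is sound because the list is strictly increasing)
lemma check_iff (p : Int) (ps : List Int) (hsort : ps.Pairwise (· < ·))
    (hall : ∀ q ∈ ps, 2 ≤ q) :
    checkPrimes ps p = true ↔ ∀ q ∈ ps, q * q ≤ p → ¬ q ∣ p := by
  induction ps with
  | nil => simp [checkPrimes]
  | cons q t ih =>
    have hq2 : 2 ≤ q := hall q List.mem_cons_self
    rw [checkPrimes]
    by_cases hgt : q * q > p
    · rw [if_pos hgt]
      constructor
      · rintro - q' hq' hle
        rcases List.mem_cons.mp hq' with rfl | hm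
        · omega
        · have hlt := (List.pairwise_cons.mp hsort).1 q' hm
          nlinarith
      · intro _; rfl
    · rw [if_neg hgt]
      by_cases hdv : (PySem.Int.mod p q == 0) = true
      · rw [if_pos hdv]
        have hd : q ∣ p := (PySem.Int.mod_eq_zero_iff_dvd p q).mp (by simpa using hdv)
        simp only [Bool.false_eq_true, false_iff]
        intro hfor
        exact hfor q List.mem_cons_self (by omega) hd
      · rw [if_neg hdv,
          ih (List.pairwise_cons.mp hsort).2 (fun q' hq' => hall q' (List.mem_cons_of_mem q hq'))]
        have hnd : ¬ q ∣ p := fun hd =>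
          hdv (by simpa using (PySem.Int.mod_eq_zero_iff_dvd p q).mpr hd)
        constructor
        · rintro hfor q' hq' hle
          rcases List.mem_cons.mp hq' with rfl | hm
          · exact hnd
          · exact hfor q' hm hle
        · intro hfor q' hq' hle
          exact hfor q' (List.mem_cons_of_mem q hq') hle

-- the invariant of B's prime-building loop: after the prefix [2, b) the list holds
-- exactly the primes below b, in increasing order
lemma primes_inv (b : Int) (hb : 2 ≤ b) :
    ((PySem.List.pyRange 2 b 1).foldl
        (fun ps p => if checkPrimes ps p then ps ++ [p] else ps) ([] : List Int)).Pairwise (· < ·) ∧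
    (∀ x : Int, x ∈ (PySem.List.pyRange 2 b 1).foldl
        (fun ps p => if checkPrimes ps p then ps ++ [p] else ps) ([] : List Int) ↔
      2 ≤ x ∧ x < b ∧ Nat.Prime x.toNat) := by
  induction b, hb using Int.le_induction with
  | base =>
    rw [PySem.List.pyRange_one_eq_nil (by omega)]
    refine ⟨List.Pairwise.nil, fun x => ?_⟩
    simp only [List.foldl_nil, List.not_mem_nil, false_iff]
    rintro ⟨h1, h, -⟩; omega
  | succ b hb ih =>
    obtain ⟨hsort, hmem⟩ := ih
    rw [PySem.List.pyRange_one_succ_right (by omega : (2:Int) ≤ b), List.foldl_append,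
      List.foldl_cons, List.foldl_nil]
    set ps := (PySem.List.pyRange 2 b 1).foldl
        (fun ps p => if checkPrimes ps p then ps ++ [p] else ps) ([] : List Int) with hps
    have hall2 : ∀ q ∈ ps, 2 ≤ q := fun q hq => ((hmem q).mp hq).1
    have hltb : ∀ q ∈ ps, q < b := fun q hq => ((hmem q).mp hq).2.1
    by_cases hchk : checkPrimes ps b = true
    · -- no listed prime divides b: b is prime, append it
      have hbp : Nat.Prime b.toNat := by
        by_contra hnp
        have hn1 : b.toNat ≠ 1 := by omega
        have hq : Nat.Prime (b.toNat).minFac := Nat.minFac_prime hn1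
        have hqd : (b.toNat).minFac ∣ b.toNat := Nat.minFac_dvd _
        have hqsq : (b.toNat).minFac ^ 2 ≤ b.toNat := Nat.minFac_sq_le_self (by omega) hnp
        have hq2 : 2 ≤ (b.toNat).minFac := hq.two_le
        have hqlt : (b.toNat).minFac < b.toNat := by nlinarith [hqsq, hq2]
        have hdZ : ((b.toNat).minFac : Int) ∣ b := by
          have hb' : ((b.toNat : Int)) = b := by omega
          rw [← hb']; exact_mod_cast hqd
        have hsqZ : ((b.toNat).minFac : Int) * ((b.toNat).minFac : Int) ≤ b := by
          have : ((b.toNat).minFac : Int) * ((b.toNat).minFac : Int)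
              = (((b.toNat).minFac ^ 2 : Nat) : Int) := by push_cast; ring
          rw [this]; omega
        have hmemq : ((b.toNat).minFac : Int) ∈ ps := by
          rw [hmem]
          exact ⟨by exact_mod_cast hq2, by omega, by simp [hq]⟩
        exact (check_iff b ps hsort hall2).mp hchk _ hmemq hsqZ hdZ
      rw [if_pos hchk]
      refine ⟨?_, fun x => ?_⟩
      · refine List.pairwise_append.mpr ⟨hsort, List.pairwise_singleton _ _, ?_⟩
        intro a ha b' hb'
        rw [List.mem_singleton] at hb'
        subst hb'
        exact hltb a ha
      · rw [List.mem_append, List.mem_singleton, hmem]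
        constructor
        · rintro (⟨h1, h2, h3⟩ | rfl)
          · exact ⟨h1, by omega, h3⟩
          · exact ⟨hb, by omega, hbp⟩
        · rintro ⟨h1, h2, h3⟩
          rcases lt_or_eq_of_le (by omega : x ≤ b) with h | rfl
          · exact Or.inl ⟨h1, h, h3⟩
          · exact Or.inr rfl
    · -- some listed prime divides b: b is composite, nothing changes
      have hchk' := hchk
      rw [check_iff b ps hsort hall2] at hchk'
      push Not at hchk'
      obtain ⟨q, hq, hle, hdvd⟩ := hchk'
      obtain ⟨hq2, hqb, hqp⟩ := (hmem q).mp hq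
      have hbnp : ¬ Nat.Prime b.toNat := by
        intro hbp
        have hd : q.toNat ∣ b.toNat := by
          have hcast : ((q.toNat : Int)) ∣ ((b.toNat : Int)) := by
            rw [Int.toNat_of_nonneg (by omega : (0:Int) ≤ q),
              Int.toNat_of_nonneg (by omega : (0:Int) ≤ b)]
            exact hdvd
          exact_mod_cast hcast
        have := (Nat.prime_dvd_prime_iff_eq hqp hbp).mp hd
        omega
      rw [if_neg hchk]
      refine ⟨hsort, fun x => ?_⟩
      rw [hmem]
      constructor
      · rintro ⟨h1, h2, h3⟩; exact ⟨h1, by omega, h3⟩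
      · rintro ⟨h1, h2, h3⟩
        refine ⟨h1, ?_, h3⟩
        rcases lt_or_eq_of_le (by omega : x ≤ b) with h | rfl
        · exact h
        · exact absurd h3 hbnp

-- membership in B's composite set
lemma mem_comp_fold (ps : List Int) (vals : List Int) (c : PySem.Set Int) (x : Int) :
    x ∈ ps.foldl (fun (c : PySem.Set Int) p =>
        PySem.Set.update c (vals.filter (fun v => PySem.Int.mod v p == 0 && v != p))) c ↔
      x ∈ c ∨ ∃ p ∈ ps, x ∈ vals ∧ p ∣ x ∧ x ≠ p := by

  induction ps generalizing c with
  | nil => simp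
  | cons p t ih =>
    rw [List.foldl_cons, ih, PySem.Set.mem_update, List.mem_filter]
    simp only [Bool.and_eq_true, beq_iff_eq, bne_iff_ne, List.mem_cons]
    constructor
    · rintro ((hc | ⟨hv, hm, hne⟩) | ⟨q, hq, h⟩)
      · exact Or.inl hc
      · exact Or.inr ⟨p, Or.inl rfl, hv, (PySem.Int.mod_eq_zero_iff_dvd x p).mp hm, hne⟩
      · exact Or.inr ⟨q, Or.inr hq, h⟩
    · rintro (hc | ⟨q, (rfl | hq), hv, hd, hne⟩)
      · exact Or.inl (Or.inl hc)
      · exact Or.inl (Or.inr ⟨hv, (PySem.Int.mod_eq_zero_iff_dvd x q).mpr hd, hne⟩)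
      · exact Or.inr ⟨q, hq, hv, hd, hne⟩


-- ===== VERDICT (by name: the statement is the Claim_ definition above) =====
-- the guard of B's counting pass agrees with A's is_prime on every element of arr
lemma guard_eq (arr : List Int) (x : Int) (hx : x ∈ arr) :
    (PySem.Set.contains (arr.foldl (fun s v => if 2 ≤ v then PySem.Set.add s v else s)
        (PySem.Set.empty : PySem.Set Int)) x &&
     !(PySem.Set.contains (((PySem.List.pyRange 2 (isqrtLoop (arr.foldl
          (fun b v => if 2 ≤ v then (if b < v then v else b) else b) 1) 1 + 1) 1).foldl
        (fun ps p => if checkPrimes ps p then ps ++ [p] else ps) ([] : List Int)).foldl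
          (fun (c : PySem.Set Int) p =>
            PySem.Set.update c ((arr.foldl (fun s v => if 2 ≤ v then PySem.Set.add s v else s)
              (PySem.Set.empty : PySem.Set Int)).filter
                (fun v => PySem.Int.mod v p == 0 && v != p)))
          (PySem.Set.empty : PySem.Set Int)) x)) = isPrimeA x := by
  set vals := arr.foldl (fun s v => if 2 ≤ v then PySem.Set.add s v else s)
      (PySem.Set.empty : PySem.Set Int) with hvals
  set big := arr.foldl (fun b v => if 2 ≤ v then (if b < v then v else b) else b) 1 with hbig
  set r := isqrtLoop big 1 with hr
  set primes := (PySem.List.pyRange 2 (r + 1) 1).foldl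
      (fun ps p => if checkPrimes ps p then ps ++ [p] else ps) ([] : List Int) with hprimes
  set composite := primes.foldl
      (fun (c : PySem.Set Int) p =>
        PySem.Set.update c (vals.filter (fun v => PySem.Int.mod v p == 0 && v != p)))
      (PySem.Set.empty : PySem.Set Int) with hcomposite
  have hvmem : ∀ y : Int, y ∈ vals ↔ y ∈ arr ∧ 2 ≤ y := by
    intro y
    rw [hvals, PySem.List.foldl_ite_eq_foldl_filter (fun v => 2 ≤ v) PySem.Set.add arr
        (PySem.Set.empty : PySem.Set Int),
      show (PySem.Set.empty : PySem.Set Int) = [] from rfl,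
      ← PySem.Set.ofList_eq_foldl, PySem.Set.mem_ofList, List.mem_filter]
    simp
  have hb1 : (1 : Int) ≤ big := (big_bounds arr 1).1
  have hble : ∀ v ∈ arr, 2 ≤ v → v ≤ big := (big_bounds arr 1).2
  have hr1 : (1 : Int) ≤ r := isqrtLoop_le big 1
  have hpmem : ∀ p : Int, p ∈ primes ↔ 2 ≤ p ∧ p < r + 1 ∧ Nat.Prime p.toNat :=
    (primes_inv (r + 1) (by omega)).2
  have hcmem : ∀ y : Int, y ∈ composite ↔ ∃ p ∈ primes, y ∈ vals ∧ p ∣ y ∧ y ≠ p := by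
    intro y
    rw [hcomposite, mem_comp_fold]
    simp
  rw [Bool.eq_iff_iff]
  simp only [Bool.and_eq_true, Bool.not_eq_eq_eq_not, Bool.not_true,
    ← Bool.not_eq_true, isPrimeA_iff]
  constructor
  · rintro ⟨hvc, hcc⟩
    have hxv : x ∈ vals := by simpa [PySem.Set.contains] using hvc
    have hxc : x ∉ composite := by simpa [PySem.Set.contains] using hcc
    have h2x : 2 ≤ x := ((hvmem x).mp hxv).2
    refine ⟨h2x, ?_⟩
    by_contra hnp
    apply hxc
    rw [hcmem]
    have hn1 : x.toNat ≠ 1 := by omega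
    have hq : Nat.Prime (x.toNat).minFac := Nat.minFac_prime hn1
    have hqd : (x.toNat).minFac ∣ x.toNat := Nat.minFac_dvd _
    have hqsq : (x.toNat).minFac ^ 2 ≤ x.toNat := Nat.minFac_sq_le_self (by omega) hnp
    have hq2 : 2 ≤ (x.toNat).minFac := hq.two_le
    have hqlt : (x.toNat).minFac < x.toNat := by nlinarith [hqsq, hq2]
    have hqdZ : ((x.toNat).minFac : Int) ∣ x := by
      have : ((x.toNat : Int)) = x := by omega
      rw [← this]
      exact_mod_cast hqd
    have hqsqZ : ((x.toNat).minFac : Int) * ((x.toNat).minFac : Int) ≤ x := by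
      have : ((x.toNat).minFac : Int) * ((x.toNat).minFac : Int)
          = (((x.toNat).minFac ^ 2 : Nat) : Int) := by push_cast; ring
      rw [this]; omega
    have hxbig : x ≤ big := hble x hx h2x
    have hqr : ((x.toNat).minFac : Int) ≤ r :=
      le_isqrtLoop big _ (by exact_mod_cast Nat.one_le_of_lt hq2)
        (le_trans hqsqZ hxbig)
    refine ⟨((x.toNat).minFac : Int), ?_, hxv, hqdZ, by omega⟩
    rw [hpmem]
    exact ⟨by exact_mod_cast hq2, by omega, by simp [hq]⟩
  · rintro ⟨h2x, hp⟩
    have hxv : x ∈ vals := (hvmem x).mpr ⟨hx, h2x⟩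
    refine ⟨by simpa [PySem.Set.contains] using hxv, ?_⟩
    have hxc : x ∉ composite := by
      rw [hcmem]
      rintro ⟨p, hpmem', -, hpd, hne⟩
      obtain ⟨hp2, -, hpp⟩ := (hpmem p).mp hpmem'
      have hd : p.toNat ∣ x.toNat := by
        have hcast : ((p.toNat : Int)) ∣ ((x.toNat : Int)) := by
          rw [Int.toNat_of_nonneg (by omega : (0:Int) ≤ p),
            Int.toNat_of_nonneg (by omega : (0:Int) ≤ x)]
          exact hpd
        exact_mod_cast hcast
      have := (Nat.prime_dvd_prime_iff_eq hpp hp).mp hd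
      omega
    simpa [PySem.Set.contains] using hxc

-- ===== VERDICT (by name: the statement is the Claim_ definition above) =====
theorem count_unique_primes_spec : Claim_equal_count_unique_primes := by
  intro arr _
  unfold Spec_count_unique_primes count_unique_primes count_unique_primes_alt
  rw [PySem.List.foldl_prod_mk (f := fun s v => if 2 ≤ v then PySem.Set.add s v else s)
      (g := fun b v => if 2 ≤ v then (if b < v then v else b) else b)]
  congr 1
  apply PySem.List.foldl_congr_mem
  intro acc x hx
  rw [guard_eq arr x hx]
  by_cases hp : isPrimeA x
  · rw [if_pos hp, if_pos hp]
    by_cases hc : acc.contains x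
    · rw [if_pos hc]
      rfl
    · rw [if_neg (by simpa using hc),
        PySem.Dict.getD_of_not_contains acc 0 (by simpa using hc)]
      norm_num
  · rw [if_neg (by simpa using hp), if_neg (by simpa using hp)]
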